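-- pv_equiv track=rewrite | github.com/Fresh-MC/CareerGap | nogap-workspace/resume_parser/career_snapshot.py | determine_skill_depth
-- ===== SOURCE A (Python) =====
-- from typing import Dict, List, Optional, Any, Set
-- from enum import Enum
--
-- class SkillDepth(str, Enum):
--     """
--     Skill maturity classification.
--
--     THEORETICAL: Knowledge from courses/certifications only, no practical application
--     APPLIED: Has been used in projects or personal work
--     PRODUCTION: Has been used in real-world settings (internships/jobs)
--     """
--     THEORETICAL = "theoretical"
--     APPLIED = "applied"
--     PRODUCTION = "production"
--
-- class EvidenceSource(str, Enum):
--     """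
--     Where skill evidence was observed.
--     Used to determine skill depth.
--     """
--     COURSE = "course"
--     CERTIFICATION = "certification"
--     PROJECT = "project"
--     INTERNSHIP = "internship"
--     JOB = "job"
--
-- EVIDENCE_DEPTH_MAP = {
--     EvidenceSource.COURSE: SkillDepth.THEORETICAL,
--     EvidenceSource.CERTIFICATION: SkillDepth.THEORETICAL,
--     EvidenceSource.PROJECT: SkillDepth.APPLIED,
--     EvidenceSource.INTERNSHIP: SkillDepth.PRODUCTION,
--     EvidenceSource.JOB: SkillDepth.PRODUCTION,
-- }
--
-- DEPTH_PRECEDENCE = [SkillDepth.THEORETICAL, SkillDepth.APPLIED, SkillDepth.PRODUCTION]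
--
-- def determine_skill_depth(evidence_sources: List[str]) -> str:
--     """
--     Determine the highest skill depth from evidence sources.
--
--     Rule: Highest precedence wins.
--     - production > applied > theoretical
--
--     Evidence mapping:
--     - internship/job → production
--     - project → applied
--     - course/certification → theoretical
--     """
--     if not evidence_sources:
--         return SkillDepth.THEORETICAL.value
--
--     max_depth = SkillDepth.THEORETICAL
--
--     for source_str in evidence_sources:
--         try:
--             source = EvidenceSource(source_str)
--             depth = EVIDENCE_DEPTH_MAP.get(source, SkillDepth.THEORETICAL)
--
--             # Check if this depth is higher precedence
--             if DEPTH_PRECEDENCE.index(depth) > DEPTH_PRECEDENCE.index(max_depth):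
--                 max_depth = depth
--         except ValueError:
--             # Unknown source, skip
--             continue
--
--     return max_depth.value
-- ===== SOURCE B (Python) =====
-- from typing import List
-- from enum import Enum
--
-- class SkillDepth(str, Enum):
--     THEORETICAL = "theoretical"
--     APPLIED = "applied"
--     PRODUCTION = "production"
--
-- class EvidenceSource(str, Enum):
--     COURSE = "course"
--     CERTIFICATION = "certification"
--     PROJECT = "project"
--     INTERNSHIP = "internship"
--     JOB = "job"
--
-- EVIDENCE_DEPTH_MAP = {
--     EvidenceSource.COURSE: SkillDepth.THEORETICAL,
--     EvidenceSource.CERTIFICATION: SkillDepth.THEORETICAL,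
--     EvidenceSource.PROJECT: SkillDepth.APPLIED,
--     EvidenceSource.INTERNSHIP: SkillDepth.PRODUCTION,
--     EvidenceSource.JOB: SkillDepth.PRODUCTION,
-- }
--
-- DEPTH_PRECEDENCE = [SkillDepth.THEORETICAL, SkillDepth.APPLIED, SkillDepth.PRODUCTION]
--
-- def determine_skill_depth(evidence_sources: List[str]) -> str:
--     # Phase 1: collect the set of depths actually evidenced (unknown sources skipped).
--     present = set()
--     for source_str in evidence_sources:
--         try:
--             present.add(EVIDENCE_DEPTH_MAP[EvidenceSource(source_str)])
--         except ValueError: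
--             continue
--     # Phase 2: probe precedence from highest to lowest.
--     for depth in reversed(DEPTH_PRECEDENCE):
--         if depth in present:
--             return depth.value
--     return SkillDepth.THEORETICAL.value
-- ===== Notes on version B (the rewrite author's own statement) =====
-- stated objective: simpler
-- what changed: Replaces the running-max loop with list.index precedence comparisons by a two-phase collect-then-probe: build the set of depths present, then return the first depth found when scanning the precedence list from highest to lowest.
import Mathlib
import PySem

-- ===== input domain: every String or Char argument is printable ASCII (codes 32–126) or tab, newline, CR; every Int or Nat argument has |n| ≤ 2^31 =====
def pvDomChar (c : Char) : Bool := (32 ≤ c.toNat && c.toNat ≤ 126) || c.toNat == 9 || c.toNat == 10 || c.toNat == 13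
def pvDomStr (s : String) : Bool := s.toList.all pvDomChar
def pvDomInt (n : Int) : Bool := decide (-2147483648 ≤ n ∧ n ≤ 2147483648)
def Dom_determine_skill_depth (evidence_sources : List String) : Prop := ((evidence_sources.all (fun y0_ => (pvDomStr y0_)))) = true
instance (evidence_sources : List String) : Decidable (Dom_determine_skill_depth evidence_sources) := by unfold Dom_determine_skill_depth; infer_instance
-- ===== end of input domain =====

-- B changes the decomposition: collect the set of depths present, then probe the
-- precedence order from highest to lowest (A keeps a running max via index comparisons).
-- ===== PORT A =====
-- EvidenceSource(source_str) → EVIDENCE_DEPTH_MAP lookup; none = ValueError (unknown source)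
def pvDepthOf? (s : String) : Option String :=
  if s = "course" then some "theoretical"
  else if s = "certification" then some "theoretical"
  else if s = "project" then some "applied"
  else if s = "internship" then some "production"
  else if s = "job" then some "production"
  else none

-- DEPTH_PRECEDENCE.index(d)
def pvPrec (d : String) : Nat :=
  if d = "theoretical" then 0 else if d = "applied" then 1 else 2

def pvALoop (xs : List String) (maxDepth : String) : String :=
  match xs with
  | [] => maxDepth
  | s :: rest =>
    match pvDepthOf? s with
    | none => pvALoop rest maxDepth
    | some d => pvALoop rest (if pvPrec d > pvPrec maxDepth then d else maxDepth)

def determine_skill_depth (evidence_sources : List String) : String :=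
  if evidence_sources = [] then "theoretical"
  else pvALoop evidence_sources "theoretical"

-- ===== PORT B =====
def determine_skill_depth_alt (evidence_sources : List String) : String :=
  let present : PySem.Set String :=
    evidence_sources.foldl (fun acc s =>
      match pvDepthOf? s with
      | some d => PySem.Set.add acc d
      | none => acc) (PySem.Set.ofList [])
  match ["production", "applied", "theoretical"].find? (fun d => decide (d ∈ present)) with
  | some d => d
  | none => "theoretical"

-- ===== PRECONDITION & SPEC =====
def Spec_determine_skill_depth (evidence_sources : List String) (out : String) : Prop := out = determine_skill_depth_alt evidence_sources
instance (evidence_sources : List String) (out : String) : Decidable (Spec_determine_skill_depth evidence_sources out) := by unfold Spec_determine_skill_depth; infer_instance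

-- ===== CLAIM (what is proved, stated in full; the proofs are below) =====
def Claim_equal_determine_skill_depth : Prop := ∀ (evidence_sources : List String), Dom_determine_skill_depth evidence_sources → Spec_determine_skill_depth evidence_sources (determine_skill_depth evidence_sources)

-- ===== LEMMAS AND PROOFS =====
def pvHasProd (xs : List String) : Bool := xs.any (fun s => s = "internship" || s = "job")
def pvHasApp (xs : List String) : Bool := xs.any (fun s => s = "project")

-- characterisation of A's running-max loop, for each of the three reachable accumulator values
lemma pvALoop_char (xs : List String) :
    pvALoop xs "theoretical" =
      (if pvHasProd xs then "production" else if pvHasApp xs then "applied" else "theoretical")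
    ∧ pvALoop xs "applied" = (if pvHasProd xs then "production" else "applied")
    ∧ pvALoop xs "production" = "production" := by
  induction xs with
  | nil => simp [pvALoop, pvHasProd, pvHasApp]
  | cons s rest ih =>
    obtain ⟨h1, h2, h3⟩ := ih
    by_cases hc : s = "course" <;> by_cases hce : s = "certification" <;>
      by_cases hp : s = "project" <;> by_cases hi : s = "internship" <;> by_cases hj : s = "job" <;>
      simp_all [pvALoop, pvDepthOf?, pvPrec, pvHasProd, pvHasApp]

-- membership in B's collected set ↔ some source maps to that depth
lemma pvSet_char (xs : List String) (acc : PySem.Set String) (d : String) :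
    (d ∈ xs.foldl (fun acc s =>
      match pvDepthOf? s with
      | some d => PySem.Set.add acc d
      | none => acc) acc) ↔ d ∈ acc ∨ xs.any (fun s => pvDepthOf? s = some d) := by
  induction xs generalizing acc with
  | nil => simp
  | cons s rest ih =>
    cases h : pvDepthOf? s <;>
      simp [List.foldl_cons, h, ih, PySem.Set.mem_add] <;> tauto

lemma pvAlt_char (xs : List String) :
    determine_skill_depth_alt xs =
      (if pvHasProd xs then "production" else if pvHasApp xs then "applied" else "theoretical") := by
  unfold determine_skill_depth_alt
  rw [show PySem.Set.ofList ([] : List String) = ([] : PySem.Set String) from rfl]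
  have hmem : ∀ d, (d ∈ xs.foldl (fun acc s =>
      match pvDepthOf? s with
      | some d => PySem.Set.add acc d
      | none => acc) ([] : PySem.Set String)) ↔ ∃ s ∈ xs, pvDepthOf? s = some d := by
    intro d
    rw [pvSet_char]
    simp
  have hprod : (∃ s ∈ xs, pvDepthOf? s = some "production") ↔ pvHasProd xs = true := by
    simp only [pvHasProd, List.any_eq, decide_eq_true_eq, Bool.or_eq_true]
    constructor <;> rintro ⟨s, hs, h⟩ <;> refine ⟨s, hs, ?_⟩ <;>
      simp only [pvDepthOf?] at * <;> split_ifs at * <;> simp_all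
  have happ : (∃ s ∈ xs, pvDepthOf? s = some "applied") ↔ pvHasApp xs = true := by
    simp only [pvHasApp, List.any_eq, decide_eq_true_eq]
    constructor <;> rintro ⟨s, hs, h⟩ <;> refine ⟨s, hs, ?_⟩ <;>
      simp only [pvDepthOf?] at * <;> split_ifs at * <;> simp_all
  rcases hPb : pvHasProd xs with _ | _ <;> rcases hAb : pvHasApp xs with _ | _ <;>
    by_cases hT : ∃ s ∈ xs, pvDepthOf? s = some "theoretical" <;>
    (rw [hPb] at hprod; rw [hAb] at happ;
     simp [List.find?, hmem, hprod, happ, hT])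

-- ===== VERDICT (by name: the statement is the Claim_ definition above) =====
theorem determine_skill_depth_spec : Claim_equal_determine_skill_depth := by
  intro xs _
  unfold Spec_determine_skill_depth determine_skill_depth
  rw [pvAlt_char]
  rcases xs with _ | ⟨s, rest⟩
  · simp [pvHasProd, pvHasApp]
  · simp only [if_neg (by simp : ¬(s :: rest = []))]
    exact (pvALoop_char (s :: rest)).1
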